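-- pv_equiv track=rewrite | github.com/hyxz/NlgMrc419 | NlgMrc419/find_ans.py | find_spans2
-- ===== SOURCE A (Python) =====
-- def find_spans2(query_tokens, passage_tokens):
--     """
--     Find spans of query in passage_tokens
--     Arguments:
--         query_tokens {[type]} -- [description]
--         passage_tokens {[type]} -- [description]
--     """
--     s = 0
--     passage_idxs = []
--     for token in passage_tokens:
--         start = s
--         end = s + len(token) - 1
--         passage_idxs.append([start, end])
--         s = end + 1
--     passage_str = ''.join(passage_tokens).lower()
--     query_str = ''.join(query_tokens).lower()
--     query_start = passage_str.find(query_str)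
--     if query_start == -1:
--         return None
--     query_end = query_start + len(query_str) - 1
--     ans_start, ans_end = -1, -1
--     for pid, p_spans in enumerate(passage_idxs):
--         if p_spans[0] <= query_start and p_spans[1] >= query_start:
--             ans_start = pid
--         if p_spans[0] <= query_end and p_spans[1] >= query_end:
--             ans_end = pid
--     if ans_start != -1 and ans_end != -1:
--         return [[ans_start, ans_end]]
--     else:
--         return None
-- ===== SOURCE B (Python) =====
-- def _bisect_right(a, x):
--     # bisect.bisect_right, hand-rolled because this module imports nothing
--     lo, hi = 0, len(a)
--     while lo < hi:
--         mid = (lo + hi) // 2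
--         if x < a[mid]:
--             hi = mid
--         else:
--             lo = mid + 1
--     return lo
--
--
-- def find_spans2(query_tokens, passage_tokens):
--     passage_str = ''.join(passage_tokens).lower()
--     query_str = ''.join(query_tokens).lower()
--     query_start = passage_str.find(query_str)
--     if query_start == -1:
--         return None
--     query_end = query_start + len(query_str) - 1
--     prefix = [0]
--     for token in passage_tokens:
--         prefix.append(prefix[-1] + len(token))
--
--     def resolve(x):
--         if x < 0 or x >= prefix[-1]:
--             return None
--         return _bisect_right(prefix, x) - 1
--
--     ans_start = resolve(query_start)
--     ans_end = resolve(query_end)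
--     if ans_start is None or ans_end is None:
--         return None
--     return [[ans_start, ans_end]]
-- ===== Notes on version B (the rewrite author's own statement) =====
-- stated objective: faster
-- what changed: B drops A's explicit [start,end] span list and linear last-match scan over all tokens, instead building a cumulative-length prefix list and resolving each of the two character offsets to its token index by binary search (hand-rolled bisect_right).
import Mathlib
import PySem

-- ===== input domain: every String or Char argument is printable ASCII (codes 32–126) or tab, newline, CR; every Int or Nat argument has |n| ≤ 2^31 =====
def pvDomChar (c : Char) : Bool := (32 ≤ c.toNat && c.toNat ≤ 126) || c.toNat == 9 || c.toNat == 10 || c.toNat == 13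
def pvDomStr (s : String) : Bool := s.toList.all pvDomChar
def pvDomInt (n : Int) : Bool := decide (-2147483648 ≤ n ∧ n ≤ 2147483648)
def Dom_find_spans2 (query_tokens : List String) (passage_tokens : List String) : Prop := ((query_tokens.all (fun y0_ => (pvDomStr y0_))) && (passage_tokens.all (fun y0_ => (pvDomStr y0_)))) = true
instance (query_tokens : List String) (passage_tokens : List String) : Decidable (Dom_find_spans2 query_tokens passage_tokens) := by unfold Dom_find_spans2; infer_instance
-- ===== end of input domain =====

-- B replaces A's explicit [start,end] span list and linear last-match scan by a cumulative-length
-- prefix list resolved with binary search (bisect_right); objective: faster lookup of the two offsets.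

-- ===== PORT A =====
-- Python's 2-element span lists [start, end] are ported as pairs (start, end).
def find_spans2 (query_tokens : List String) (passage_tokens : List String) : Option (List (List Int)) :=
  let st := passage_tokens.foldl
    (fun (st : Int × List (Int × Int)) token =>
      let s := st.1
      let start := s
      let e := s + PySem.Str.len token - 1
      (e + 1, st.2 ++ [(start, e)])) (0, [])
  let passage_idxs := st.2
  let passage_str := PySem.Str.lower (PySem.Str.join "" passage_tokens)
  let query_str := PySem.Str.lower (PySem.Str.join "" query_tokens)
  let query_start := PySem.Str.find passage_str query_str
  if query_start = -1 then none
  else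
    let query_end := query_start + PySem.Str.len query_str - 1
    let r := (PySem.List.enumerate passage_idxs).foldl
      (fun (acc : Int × Int) pe =>
        (if pe.2.1 ≤ query_start ∧ query_start ≤ pe.2.2 then pe.1 else acc.1,
         if pe.2.1 ≤ query_end ∧ query_end ≤ pe.2.2 then pe.1 else acc.2)) (-1, -1)
    if r.1 ≠ -1 ∧ r.2 ≠ -1 then some [[r.1, r.2]] else none

-- ===== PORT B =====
-- Source B's hand-rolled _bisect_right is the standard bisect_right: ported as PySem.List.bisectRight.
def find_spans2_alt (query_tokens : List String) (passage_tokens : List String) : Option (List (List Int)) :=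
  let passage_str := PySem.Str.lower (PySem.Str.join "" passage_tokens)
  let query_str := PySem.Str.lower (PySem.Str.join "" query_tokens)
  let query_start := PySem.Str.find passage_str query_str
  if query_start = -1 then none
  else
    let query_end := query_start + PySem.Str.len query_str - 1
    let pre := passage_tokens.foldl
      (fun (acc : List Int) token => acc ++ [acc.getLastD 0 + PySem.Str.len token]) [0]
    let resolve := fun (x : Int) =>
      if x < 0 ∨ pre.getLastD 0 ≤ x then none
      else some ((PySem.List.bisectRight pre x : Int) - 1)
    match resolve query_start, resolve query_end with
    | some a, some b => some [[a, b]]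
    | _, _ => none

-- ===== PRECONDITION & SPEC =====
def Spec_find_spans2 (query_tokens : List String) (passage_tokens : List String) (out : Option (List (List Int))) : Prop := out = find_spans2_alt query_tokens passage_tokens
instance (query_tokens : List String) (passage_tokens : List String) (out : Option (List (List Int))) : Decidable (Spec_find_spans2 query_tokens passage_tokens out) := by unfold Spec_find_spans2; infer_instance

-- ===== CLAIM (what is proved, stated in full; the proofs are below) =====
def Claim_equal_find_spans2 : Prop := ∀ (query_tokens : List String) (passage_tokens : List String), Dom_find_spans2 query_tokens passage_tokens → Spec_find_spans2 query_tokens passage_tokens (find_spans2 query_tokens passage_tokens)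

-- ===== LEMMAS AND PROOFS =====

-- total length (in characters) of a token list
def pvTotal (L : List String) : Int := (L.map PySem.Str.len).sum

-- the cumulative prefix list B builds, starting at offset s
def pvPrefFrom (s : Int) : List String → List Int
  | [] => [s]
  | t :: L => s :: pvPrefFrom (s + PySem.Str.len t) L

-- the span list A builds, starting at offset s
def pvSpansFrom (s : Int) : List String → List (Int × Int)
  | [] => []
  | t :: L => (s, s + PySem.Str.len t - 1) :: pvSpansFrom (s + PySem.Str.len t) L

-- the token index containing character offset x, tokens laid out from offset s
def pvFindTok (x : Int) (s : Int) : List String → Option Nat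
  | [] => none
  | t :: L => if s ≤ x ∧ x ≤ s + PySem.Str.len t - 1 then some 0
              else (pvFindTok x (s + PySem.Str.len t) L).map (· + 1)

theorem pvLen_nonneg (t : String) : 0 ≤ PySem.Str.len t := by
  simp [PySem.Str.len]

theorem pvTotal_nonneg (L : List String) : 0 ≤ pvTotal L := by
  induction L with
  | nil => simp [pvTotal]
  | cons t L ih =>
      simp only [pvTotal, List.map_cons, List.sum_cons] at *
      have := pvLen_nonneg t; omega

theorem pvTotal_cons (t : String) (L : List String) :
    pvTotal (t :: L) = PySem.Str.len t + pvTotal L := by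
  simp [pvTotal]

theorem pvDropLast_concat_getLastD (l : List Int) (h : l ≠ []) :
    l.dropLast ++ [l.getLastD 0] = l := by
  induction l with
  | nil => simp at h
  | cons a l ih =>
      cases l with
      | nil => simp
      | cons b m =>
          rw [List.getLastD_cons, List.dropLast_cons₂, List.cons_append,
            show (b :: m).getLastD a = (b :: m).getLastD 0 from by
              rw [List.getLastD_cons, List.getLastD_cons],
            ih (by simp)]

-- A's first loop builds pvSpansFrom
theorem pvA_spans (L : List String) : ∀ (s : Int) (acc : List (Int × Int)),
    L.foldl (fun (st : Int × List (Int × Int)) token =>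
      (st.1 + PySem.Str.len token - 1 + 1, st.2 ++ [(st.1, st.1 + PySem.Str.len token - 1)])) (s, acc)
    = (s + pvTotal L, acc ++ pvSpansFrom s L) := by
  induction L with
  | nil => intro s acc; simp [pvTotal, pvSpansFrom]
  | cons t L ih =>
      intro s acc
      simp only [List.foldl_cons]
      rw [show s + PySem.Str.len t - 1 + 1 = s + PySem.Str.len t by ring, ih]
      simp only [Prod.mk.injEq, pvSpansFrom, pvTotal_cons]
      constructor
      · ring
      · simp

-- B's prefix loop builds pvPrefFrom
theorem pvB_prefix (L : List String) : ∀ (acc : List Int) (s : Int),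
    acc ≠ [] → acc.getLastD 0 = s →
    L.foldl (fun (acc : List Int) token => acc ++ [acc.getLastD 0 + PySem.Str.len token]) acc
    = acc.dropLast ++ pvPrefFrom s L := by
  induction L with
  | nil =>
      intro acc s hne hlast
      simp only [List.foldl_nil, pvPrefFrom]
      rw [← hlast, pvDropLast_concat_getLastD acc hne]
  | cons t L ih =>
      intro acc s hne hlast
      simp only [List.foldl_cons]
      rw [hlast, ih (acc ++ [s + PySem.Str.len t]) (s + PySem.Str.len t) (by simp)
            (by rw [List.getLastD_concat]), List.dropLast_concat, pvPrefFrom]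
      conv_lhs => rw [← pvDropLast_concat_getLastD acc hne, hlast]
      simp

theorem pvPrefFrom_length (s : Int) (L : List String) :
    (pvPrefFrom s L).length = L.length + 1 := by
  induction L generalizing s with
  | nil => simp [pvPrefFrom]
  | cons t L ih => simp [pvPrefFrom, ih]

theorem pvPrefFrom_getLastD (s : Int) (L : List String) (d : Int) :
    (pvPrefFrom s L).getLastD d = s + pvTotal L := by
  induction L generalizing s d with
  | nil => simp [pvPrefFrom, pvTotal]
  | cons t L ih =>
      rw [pvPrefFrom, pvTotal_cons, List.getLastD_cons, ih]
      ring

theorem pvPrefFrom_getElem (s : Int) (L : List String) (i : Nat)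
    (h : i < (pvPrefFrom s L).length) :
    (pvPrefFrom s L)[i] = s + pvTotal (L.take i) := by
  induction L generalizing s i with
  | nil =>
      rw [pvPrefFrom_length, List.length_nil] at h
      have hi : i = 0 := by omega
      subst hi; simp [pvPrefFrom, pvTotal]
  | cons t L ih =>
      cases i with
      | zero => simp [pvPrefFrom, pvTotal]
      | succ i =>
          have h' : i < (pvPrefFrom (s + PySem.Str.len t) L).length := by
            rw [pvPrefFrom_length]
            rw [pvPrefFrom_length, List.length_cons] at h
            omega
          simp only [pvPrefFrom, List.getElem_cons_succ, List.take_succ_cons, pvTotal_cons]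
          rw [ih (s + PySem.Str.len t) i h']
          ring

theorem pvLe_of_mem_prefFrom (s s' : Int) (L : List String) (hs : s ≤ s') :
    ∀ y ∈ pvPrefFrom s' L, s ≤ y := by
  induction L generalizing s' with
  | nil => intro y hy; simp [pvPrefFrom] at hy; omega
  | cons t L ih =>
      intro y hy
      simp only [pvPrefFrom, List.mem_cons] at hy
      rcases hy with h | h
      · omega
      · exact ih (s' + PySem.Str.len t) (by have := pvLen_nonneg t; omega) y h

theorem pvPrefFrom_pairwise (s : Int) (L : List String) :
    (pvPrefFrom s L).Pairwise (fun a b => a ≤ b) := by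
  induction L generalizing s with
  | nil => simp [pvPrefFrom]
  | cons t L ih =>
      rw [pvPrefFrom]
      refine List.pairwise_cons.mpr ⟨?_, ih _⟩
      exact pvLe_of_mem_prefFrom s (s + PySem.Str.len t) L (by have := pvLen_nonneg t; omega)

-- no span starting at or after s can contain x when x < s
theorem pvScan_no_match (x : Int) (L : List String) : ∀ (s k init : Int), x < s →
    (PySem.List.enumerate (pvSpansFrom s L) k).foldl
      (fun (a : Int) pe => if pe.2.1 ≤ x ∧ x ≤ pe.2.2 then pe.1 else a) init = init := by
  induction L with
  | nil => intro s k init _; simp [pvSpansFrom, PySem.List.enumerate_nil]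
  | cons t L ih =>
      intro s k init hx
      rw [pvSpansFrom, PySem.List.enumerate_cons, List.foldl_cons]
      dsimp only
      rw [if_neg (by omega)]
      exact ih (s + PySem.Str.len t) (k + 1) init (by have := pvLen_nonneg t; omega)

theorem pvFindTok_none_of_lt (x : Int) (L : List String) : ∀ s : Int, x < s →
    pvFindTok x s L = none := by
  induction L with
  | nil => intro s _; simp [pvFindTok]
  | cons t L ih =>
      intro s hx
      rw [pvFindTok, if_neg (by omega), ih (s + PySem.Str.len t) (by have := pvLen_nonneg t; omega)]
      rfl

theorem pvFindTok_none_of_ge (x : Int) (L : List String) : ∀ s : Int, s + pvTotal L ≤ x →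
    pvFindTok x s L = none := by
  induction L with
  | nil => intro s _; simp [pvFindTok]
  | cons t L ih =>
      intro s hx
      rw [pvTotal_cons] at hx
      have h1 := pvTotal_nonneg L
      rw [pvFindTok, if_neg (by omega), ih (s + PySem.Str.len t) (by omega)]
      rfl

-- A's last-match scan computes pvFindTok
theorem pvScan_eq_findTok (x : Int) (L : List String) : ∀ (s k init : Int),
    (PySem.List.enumerate (pvSpansFrom s L) k).foldl
      (fun (a : Int) pe => if pe.2.1 ≤ x ∧ x ≤ pe.2.2 then pe.1 else a) init
    = match pvFindTok x s L with
      | some j => k + (j : Int)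
      | none => init := by
  induction L with
  | nil => intro s k init; simp [pvSpansFrom, pvFindTok, PySem.List.enumerate_nil]
  | cons t L ih =>
      intro s k init
      rw [pvSpansFrom, PySem.List.enumerate_cons, List.foldl_cons, pvFindTok]
      dsimp only
      by_cases h : s ≤ x ∧ x ≤ s + PySem.Str.len t - 1
      · rw [if_pos h, if_pos h]
        rw [pvScan_no_match x L (s + PySem.Str.len t) (k + 1) k (by omega)]
        simp
      · rw [if_neg h, if_neg h, ih (s + PySem.Str.len t) (k + 1) init]
        cases pvFindTok x (s + PySem.Str.len t) L with
        | none => rfl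
        | some j => simp; ring

-- bracketed offset determines pvFindTok
theorem pvFindTok_of_bracket (x : Int) (L : List String) : ∀ (s : Int) (j : Nat),
    j < L.length → s + pvTotal (L.take j) ≤ x → x < s + pvTotal (L.take (j + 1)) →
    pvFindTok x s L = some j := by
  induction L with
  | nil => intro s j h; simp at h
  | cons t L ih =>
      intro s j hj h1 h2
      cases j with
      | zero =>
          simp only [List.take_succ_cons, List.take_zero, pvTotal_cons] at h1 h2
          have h0 : pvTotal ([] : List String) = 0 := by simp [pvTotal]
          rw [pvFindTok, if_pos (by omega)]
      | succ j =>
          simp only [List.take_succ_cons, pvTotal_cons] at h1 h2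
          have h0 := pvTotal_nonneg (L.take j)
          rw [pvFindTok, if_neg (by omega),
            ih (s + PySem.Str.len t) j (by simpa using hj) (by omega) (by omega)]
          rfl

-- split A's paired scan into two independent scans
theorem pvFoldl_pair_split (l : List (Int × (Int × Int))) (x y : Int) :
    ∀ (i1 i2 : Int),
    l.foldl (fun (acc : Int × Int) pe =>
        (if pe.2.1 ≤ x ∧ x ≤ pe.2.2 then pe.1 else acc.1,
         if pe.2.1 ≤ y ∧ y ≤ pe.2.2 then pe.1 else acc.2)) (i1, i2)
    = (l.foldl (fun (a : Int) pe => if pe.2.1 ≤ x ∧ x ≤ pe.2.2 then pe.1 else a) i1,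
       l.foldl (fun (a : Int) pe => if pe.2.1 ≤ y ∧ y ≤ pe.2.2 then pe.1 else a) i2) := by
  induction l with
  | nil => intro i1 i2; rfl
  | cons p l ih => intro i1 i2; simp only [List.foldl_cons]; rw [ih]

-- the per-offset equivalence: A's scan result vs B's resolve
theorem pvComp (L : List String) (x : Int) :
    (match (if x < 0 ∨ (pvPrefFrom 0 L).getLastD 0 ≤ x then none
            else some ((PySem.List.bisectRight (pvPrefFrom 0 L) x : Int) - 1)) with
     | some v => v
     | none => (-1 : Int))
    = (match pvFindTok x 0 L with
       | some j => (0 : Int) + (j : Int)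
       | none => (-1 : Int))
    ∧ ∀ v, (if x < 0 ∨ (pvPrefFrom 0 L).getLastD 0 ≤ x then none
            else some ((PySem.List.bisectRight (pvPrefFrom 0 L) x : Int) - 1)) = some v → 0 ≤ v := by
  rw [pvPrefFrom_getLastD]
  by_cases hneg : x < 0
  · rw [if_pos (Or.inl (by omega)), pvFindTok_none_of_lt x L 0 (by omega)]
    exact ⟨rfl, by simp⟩
  · by_cases hbig : 0 + pvTotal L ≤ x
    · rw [if_pos (Or.inr (by omega)), pvFindTok_none_of_ge x L 0 hbig]
      exact ⟨rfl, by simp⟩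
    · rw [if_neg (by omega)]
      obtain ⟨hle, hlt, hge⟩ := PySem.List.bisectRight_spec (pvPrefFrom 0 L) x (pvPrefFrom_pairwise 0 L)
      obtain ⟨br, hbr⟩ : ∃ br, PySem.List.bisectRight (pvPrefFrom 0 L) x = br := ⟨_, rfl⟩
      rw [hbr] at hle hlt hge ⊢
      have hlen : (pvPrefFrom 0 L).length = L.length + 1 := pvPrefFrom_length 0 L
      have hpos : 1 ≤ br := by
        by_contra h
        have := hge 0 (by omega) (by omega)
        rw [pvPrefFrom_getElem] at this
        simp [pvTotal] at this; omega
      have hub : br ≤ L.length := by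
        by_contra h
        have h2 := hlt L.length (by omega) (by omega)
        rw [pvPrefFrom_getElem] at h2
        simp at h2; omega
      have hj1 : 0 + pvTotal (L.take (br - 1)) ≤ x := by
        have := hlt (br - 1) (by omega) (by omega)
        rwa [pvPrefFrom_getElem] at this
      have hj2 : x < 0 + pvTotal (L.take (br - 1 + 1)) := by
        have := hge br (by omega) (by omega)
        rw [pvPrefFrom_getElem] at this
        have hbe : br - 1 + 1 = br := by omega
        rwa [hbe]
      rw [pvFindTok_of_bracket x L 0 (br - 1) (by omega) hj1 hj2]
      constructor
      · simp [Nat.cast_sub hpos]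
      · intro v hv
        simp only [Option.some.injEq] at hv
        omega

-- ===== VERDICT (by name: the statement is the Claim_ definition above) =====
set_option maxHeartbeats 1000000 in
theorem find_spans2_spec : Claim_equal_find_spans2 := by
  intro q L _
  show find_spans2 q L = find_spans2_alt q L
  simp only [find_spans2, find_spans2_alt]
  rw [pvA_spans L 0 [], pvB_prefix L [0] 0 (by simp) (by simp)]
  simp only [List.nil_append, List.dropLast_singleton]
  generalize PySem.Str.lower (PySem.Str.join "" L) = PS
  generalize hQL : PySem.Str.len (PySem.Str.lower (PySem.Str.join "" q)) = QL
  generalize hqs : PySem.Str.find PS (PySem.Str.lower (PySem.Str.join "" q)) = qs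
  by_cases hq : qs = -1
  · rw [if_pos hq, if_pos hq]
  · rw [if_neg hq, if_neg hq]
    rw [pvFoldl_pair_split]
    rw [pvScan_eq_findTok qs L 0 0 (-1), pvScan_eq_findTok (qs + QL - 1) L 0 0 (-1)]
    obtain ⟨e1, p1⟩ := pvComp L qs
    obtain ⟨e2, p2⟩ := pvComp L (qs + QL - 1)
    simp only [zero_add] at e1 e2
    cases h1 : (if qs < 0 ∨ (pvPrefFrom 0 L).getLastD 0 ≤ qs then none
            else some ((PySem.List.bisectRight (pvPrefFrom 0 L) qs : Int) - 1)) with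
    | none =>
        rw [h1] at e1
        rw [if_neg (by simp [← e1])]
    | some a =>
        rw [h1] at e1
        have ha := p1 a h1
        cases h2 : (if qs + QL - 1 < 0 ∨ (pvPrefFrom 0 L).getLastD 0 ≤ qs + QL - 1 then none
            else some ((PySem.List.bisectRight (pvPrefFrom 0 L) (qs + QL - 1) : Int) - 1)) with
        | none =>
            rw [h2] at e2
            rw [if_neg (by simp [← e2])]
        | some b =>
            rw [h2] at e2
            have hb := p2 b h2
            rw [if_pos (by refine ⟨by simp [← e1]; omega, by simp [← e2]; omega⟩)]
            simp [← e1, ← e2]
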